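-- pv_equiv track=rewrite | github.com/nathangeffen/sudoku | solver/sudoku.py | get_impossibles
-- ===== SOURCE A (Python) =====
-- def get_impossibles(board, index, region):
--     impossibles = [0] * 9
--     for i in region:
--         if i == index:
--             continue
--         if board[i] > 0:
--             impossibles[board[i] - 1] = 1
--     return impossibles
-- ===== SOURCE B (Python) =====
-- def get_impossibles(board, index, region):
--     # Output-driven: for each digit d, scan the region for an occurrence of d.
--     return [int(any(i != index and board[i] == d for i in region))
--             for d in range(1, 10)]
-- ===== Notes on version B (the rewrite author's own statement) =====
-- stated objective: simpler
-- what changed: A is input-driven (one pass over the region indices, marking slots of a preallocated 9-array in place); B is output-driven (for each digit 1..9 it performs an existence scan of the region asking whether that digit occurs at a cell other than index), so there is no marking array and no mutation at all.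
import Mathlib
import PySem

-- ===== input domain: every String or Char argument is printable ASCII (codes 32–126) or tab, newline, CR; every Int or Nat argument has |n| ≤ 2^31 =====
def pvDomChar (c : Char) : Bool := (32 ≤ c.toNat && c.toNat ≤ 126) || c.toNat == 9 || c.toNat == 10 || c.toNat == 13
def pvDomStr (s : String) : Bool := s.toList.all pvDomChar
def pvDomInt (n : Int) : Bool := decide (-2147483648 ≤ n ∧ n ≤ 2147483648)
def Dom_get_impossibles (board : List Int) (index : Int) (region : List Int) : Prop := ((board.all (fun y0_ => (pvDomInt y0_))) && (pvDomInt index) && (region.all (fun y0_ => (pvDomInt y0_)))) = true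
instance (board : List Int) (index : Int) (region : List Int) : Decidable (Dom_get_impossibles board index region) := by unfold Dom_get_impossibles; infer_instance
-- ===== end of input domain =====

-- B replaces A's input-driven marking pass by an output-driven existence scan per digit 1..9 (objective: simpler).

-- ===== PORT A =====
-- one iteration of A's loop body (board[i] via pyGetD, assignment via pySetD; exact under Pre_)
def stepA (board : List Int) (index : Int) (imp : List Int) (i : Int) : List Int :=
  if i = index then imp
  else
    if PySem.List.pyGetD board i 0 > 0 then
      PySem.List.pySetD imp (PySem.List.pyGetD board i 0 - 1) 1
    else imp

def get_impossibles (board : List Int) (index : Int) (region : List Int) : List Int :=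
  region.foldl (stepA board index) (List.replicate 9 0)

-- ===== PORT B =====
-- [int(any(i != index and board[i] == d for i in region)) for d in range(1, 10)]
def get_impossibles_alt (board : List Int) (index : Int) (region : List Int) : List Int :=
  (PySem.List.pyRange 1 10 1).map (fun d =>
    if region.any (fun i => decide (i ≠ index) && (PySem.List.pyGetD board i 0 == d)) then 1 else 0)

-- ===== PRECONDITION & SPEC =====
-- Pre_ holds exactly when the Python A returns: every region index other than `index` must be a
-- valid (possibly negative) index of board, and the cell there must hold ≤ 9 (else board[i]-1 is
-- out of the 9-slot range and A raises IndexError).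
def Pre_get_impossibles (board : List Int) (index : Int) (region : List Int) : Prop :=
  ∀ i ∈ region, i ≠ index →
    PySem.Raise.InRange board.length i ∧ PySem.List.pyGetD board i 0 ≤ 9

instance (board : List Int) (index : Int) (region : List Int) : Decidable (Pre_get_impossibles board index region) := by unfold Pre_get_impossibles; infer_instance

def pvWitness_get_impossibles : List Int × Int × List Int := ([3, 0, 5], 1, [0, 1, 2])

def Spec_get_impossibles (board : List Int) (index : Int) (region : List Int) (out : List Int) : Prop := out = get_impossibles_alt board index region
instance (board : List Int) (index : Int) (region : List Int) (out : List Int) : Decidable (Spec_get_impossibles board index region out) := by unfold Spec_get_impossibles; infer_instance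

-- ===== CLAIM (what is proved, stated in full; the proofs are below) =====
def Claim_equal_get_impossibles : Prop := ∀ (board : List Int) (index : Int) (region : List Int), Dom_get_impossibles board index region → Pre_get_impossibles board index region → Spec_get_impossibles board index region (get_impossibles board index region)


-- ===== LEMMAS AND PROOFS =====

lemma length_foldA (board : List Int) (index : Int) :
    ∀ (region : List Int) (imp : List Int),
      (region.foldl (stepA board index) imp).length = imp.length := by
  intro region
  induction region with
  | nil => intro imp; rfl
  | cons i rest ih =>
      intro imp
      simp only [List.foldl_cons, stepA]
      split_ifs with hidx hpos
      · exact ih imp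
      · rw [ih, PySem.List.length_pySetD]
      · exact ih imp

-- entry k of A's fold = 1 iff digit k+1 occurs at some region cell (else the start value)
lemma foldA_pyGetD (board : List Int) (index : Int) :
    ∀ (region : List Int) (imp : List Int), imp.length = 9 → ∀ k : Nat, k < 9 →
      PySem.List.pyGetD (region.foldl (stepA board index) imp) (k : Int) 0 =
        if (∃ i ∈ region, i ≠ index ∧ PySem.List.pyGetD board i 0 = (k : Int) + 1) then 1
        else PySem.List.pyGetD imp (k : Int) 0 := by
  intro region
  induction region with
  | nil => intro imp _ k _; simp
  | cons i rest ih =>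
      intro imp hlen k hk
      simp only [List.foldl_cons, stepA]
      by_cases hidx : i = index
      · simp only [if_pos hidx]
        rw [ih imp hlen k hk]
        subst hidx
        congr 1
        simp only [eq_iff_iff]
        constructor
        · rintro ⟨j, hj, hne, he⟩; exact ⟨j, List.mem_cons_of_mem _ hj, hne, he⟩
        · rintro ⟨j, hj, hne, he⟩
          rcases List.mem_cons.mp hj with rfl | hj
          · exact absurd rfl hne
          · exact ⟨j, hj, hne, he⟩
      · simp only [if_neg hidx]
        set v := PySem.List.pyGetD board i 0 with hv
        by_cases hpos : v > 0
        · simp only [if_pos hpos]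
          have hlen' : (PySem.List.pySetD imp (v - 1) 1).length = 9 := by
            rw [PySem.List.length_pySetD]; exact hlen
          rw [ih _ hlen' k hk]
          by_cases hrest : ∃ j ∈ rest, j ≠ index ∧ PySem.List.pyGetD board j 0 = (k : Int) + 1
          · rw [if_pos hrest, if_pos (by obtain ⟨j, hj, hne, he⟩ := hrest; exact ⟨j, List.mem_cons_of_mem _ hj, hne, he⟩)]
          · rw [if_neg hrest]
            have hcast : v - 1 = (((v - 1).toNat : Nat) : Int) := by omega
            by_cases hvk : v = (k : Int) + 1
            · have hcond : ∃ j ∈ i :: rest, j ≠ index ∧ PySem.List.pyGetD board j 0 = (k : Int) + 1 :=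
                ⟨i, (List.mem_cons_self ..), hidx, by rw [← hv]; exact hvk⟩
              rw [if_pos hcond]
              have hnk : (v - 1).toNat = k := by omega
              rw [hcast, hnk, PySem.List.pySetD_natCast, PySem.List.pyGetD_natCast,
                  List.getD_eq_getElem _ _ (by simp [hlen]; omega : k < (imp.set k 1).length),
                  List.getElem_set_self (by simp [hlen]; omega : k < (imp.set k 1).length)]
            · have hcond : ¬ ∃ j ∈ i :: rest, j ≠ index ∧ PySem.List.pyGetD board j 0 = (k : Int) + 1 := by
                rintro ⟨j, hj, hne, he⟩
                rcases List.mem_cons.mp hj with rfl | hj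
                · exact hvk (by rw [hv]; exact he)
                · exact hrest ⟨j, hj, hne, he⟩
              rw [if_neg hcond]
              by_cases hv9 : v ≤ 9
              · rw [hcast, PySem.List.pySetD_natCast, PySem.List.pyGetD_natCast, PySem.List.pyGetD_natCast,
                    List.getD_eq_getElem _ _ (by simp [hlen]; omega : k < (imp.set (v-1).toNat 1).length),
                    List.getD_eq_getElem _ _ (by omega : k < imp.length),
                    List.getElem_set_ne (by omega : (v-1).toNat ≠ k)]
              · rw [hcast, PySem.List.pySetD_natCast,
                    List.set_eq_of_length_le (by omega : imp.length ≤ (v - 1).toNat)]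
        · simp only [if_neg hpos]
          rw [ih imp hlen k hk]
          congr 1
          simp only [eq_iff_iff]
          constructor
          · rintro ⟨j, hj, hne, he⟩; exact ⟨j, List.mem_cons_of_mem _ hj, hne, he⟩
          · rintro ⟨j, hj, hne, he⟩
            rcases List.mem_cons.mp hj with rfl | hj
            · exfalso; rw [← hv] at he; omega
            · exact ⟨j, hj, hne, he⟩

-- ===== VERDICT (by name: the statement is the Claim_ definition above) =====
theorem get_impossibles_spec : Claim_equal_get_impossibles := by
  intro board index region _ _
  unfold Spec_get_impossibles get_impossibles get_impossibles_alt
  have hlenA : (region.foldl (stepA board index) (List.replicate 9 0)).length = 9 := by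
    rw [length_foldA]; simp
  apply List.ext_getElem (by rw [length_foldA]; simp [PySem.List.length_pyRange_one])
  intro k hk1 hk2
  have hk : k < 9 := by omega
  have hA : (region.foldl (stepA board index) (List.replicate 9 0))[k] =
      PySem.List.pyGetD (region.foldl (stepA board index) (List.replicate 9 0)) (k : Int) 0 := by
    rw [PySem.List.pyGetD_natCast, List.getD_eq_getElem _ _ (by omega)]
  rw [hA, foldA_pyGetD board index region _ (by simp) k hk]
  have hkr : k < (PySem.List.pyRange 1 10 1).length := by
    simp [PySem.List.length_pyRange_one]; omega
  rw [List.getElem_map, PySem.List.getElem_pyRange_one]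
  have hany : (region.any (fun i => decide (i ≠ index) && (PySem.List.pyGetD board i 0 == (1 + (k : Int))))) = true ↔
      ∃ i ∈ region, i ≠ index ∧ PySem.List.pyGetD board i 0 = (k : Int) + 1 := by
    simp only [List.any_eq_true, Bool.and_eq_true, decide_eq_true_eq, beq_iff_eq]
    constructor
    · rintro ⟨i, hi, hne, he⟩; exact ⟨i, hi, hne, by omega⟩
    · rintro ⟨i, hi, hne, he⟩; exact ⟨i, hi, hne, by omega⟩
  by_cases hc : ∃ i ∈ region, i ≠ index ∧ PySem.List.pyGetD board i 0 = (k : Int) + 1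
  · rw [if_pos hc, if_pos (hany.mpr hc)]
  · have h0 : PySem.List.pyGetD (List.replicate 9 (0:Int)) (k : Int) 0 = 0 := by
      rw [PySem.List.pyGetD_natCast, List.getD_eq_getElem _ _ (by simpa using hk), List.getElem_replicate]
    rw [if_neg hc, h0, if_neg (fun h => hc (hany.mp h))]
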